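-- pv_equiv track=rewrite | github.com/AndrewTaro/Python2Dict | Python2Dict.py | __get_dksize
-- ===== SOURCE A (Python) =====
-- DK_SIZE = 8
--
-- def __get_dksize(dict):
--     #https://github.com/python/cpython/blob/v2.7.12/Objects/dictobject.c#L802-L819
--     length = len(dict)
--     size_coeff = 4
--     count = 0
--     if length > 50000:
--         size_coeff = 2
--     while True:
--         size = DK_SIZE * (size_coeff ** count)
--         if (length * 3) < (size * 2):
--             return size
--         count += 1
-- ===== SOURCE B (Python) =====
-- def __get_dksize(dict):
--     length = len(dict)
--     t = max(8, length * 3 // 2 + 1)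
--     e = (t - 1).bit_length()
--     if length <= 50000 and (e - 3) % 2 == 1:
--         e += 1
--     return 1 << e
-- ===== Notes on version B (the rewrite author's own statement) =====
-- stated objective: simpler
-- what changed: Replaces A's unbounded growth loop over counts with a closed-form computation: the minimal required size t = max(8, 3*len//2 + 1) is rounded up to the next power of two via bit_length, and the exponent is rounded up to the odd form 3+2c when the coefficient is 4 (len <= 50000).
import Mathlib
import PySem

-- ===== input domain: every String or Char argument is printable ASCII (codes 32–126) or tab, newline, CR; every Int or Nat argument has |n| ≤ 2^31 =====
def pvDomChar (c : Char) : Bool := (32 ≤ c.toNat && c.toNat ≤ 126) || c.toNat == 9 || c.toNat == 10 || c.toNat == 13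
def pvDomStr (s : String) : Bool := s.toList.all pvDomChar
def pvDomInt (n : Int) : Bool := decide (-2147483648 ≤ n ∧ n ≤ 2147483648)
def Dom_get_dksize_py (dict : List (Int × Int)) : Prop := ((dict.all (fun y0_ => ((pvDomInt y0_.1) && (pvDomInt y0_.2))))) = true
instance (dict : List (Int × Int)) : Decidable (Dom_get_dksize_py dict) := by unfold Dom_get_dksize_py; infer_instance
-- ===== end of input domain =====

-- B replaces A's growth loop with a closed-form bit_length computation of the same size; objective: simpler.


-- ===== PORT A =====
-- the 'while True' loop of A: size = 8 * coeff ^ count; return size once length*3 < size*2,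
-- else retry with count + 1.  fuel only guards totality (proved sufficient below); it is
-- never exhausted on the fuel the port supplies.
def dkLoop (length coeff : Nat) : Nat → Nat → Nat
  | _, 0 => 0
  | count, fuel + 1 =>
    let size := 8 * coeff ^ count
    if length * 3 < size * 2 then size
    else dkLoop length coeff (count + 1) fuel

def get_dksize_py (dict : List (Int × Int)) : Int :=
  let length := dict.length
  -- size_coeff = 4, overridden to 2 when length > 50000
  if length > 50000 then (dkLoop length 2 0 (length * 3 + 1) : Int)
  else (dkLoop length 4 0 (length * 3 + 1) : Int)

-- ===== PORT B =====
-- Python's (t-1).bit_length() is Nat.size (t-1); 1 << e is 2 ^ e.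
def get_dksize_py_alt (dict : List (Int × Int)) : Int :=
  let length := dict.length
  let t := max 8 (length * 3 / 2 + 1)
  let e0 := Nat.size (t - 1)
  let e := if length ≤ 50000 ∧ (e0 - 3) % 2 = 1 then e0 + 1 else e0
  ((2 ^ e : Nat) : Int)

-- ===== PRECONDITION & SPEC =====
def Spec_get_dksize_py (dict : List (Int × Int)) (out : Int) : Prop := out = get_dksize_py_alt dict
instance (dict : List (Int × Int)) (out : Int) : Decidable (Spec_get_dksize_py dict out) := by unfold Spec_get_dksize_py; infer_instance

-- ===== CLAIM (what is proved, stated in full; the proofs are below) =====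
def Claim_equal_get_dksize_py : Prop := ∀ (dict : List (Int × Int)), Dom_get_dksize_py dict → Spec_get_dksize_py dict (get_dksize_py dict)

-- ===== LEMMAS AND PROOFS =====

-- the loop's stopping condition is eventually satisfied
lemma dk_exists (L coeff : Nat) (h2 : 2 ≤ coeff) : ∃ c, L * 3 < (8 * coeff ^ c) * 2 := by
  refine ⟨L * 3, ?_⟩
  have h1 : L * 3 < 2 ^ (L * 3) := Nat.lt_two_pow_self
  have h3 : 2 ^ (L * 3) ≤ coeff ^ (L * 3) := Nat.pow_le_pow_left h2 _
  have : 1 ≤ coeff ^ (L * 3) := Nat.one_le_pow _ _ (by omega)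
  omega

-- least c for the condition, characterised by Nat.find_eq_iff
lemma find_eq_of (L coeff : Nat) (h2 : 2 ≤ coeff) (c : Nat)
    (h : L * 3 < (8 * coeff ^ c) * 2) (hmin : ∀ j, j < c → ¬ (L * 3 < (8 * coeff ^ j) * 2)) :
    Nat.find (dk_exists L coeff h2) = c :=
  (Nat.find_eq_iff _).mpr ⟨h, hmin⟩

-- with enough fuel, the loop returns 8*coeff^c for the least c satisfying the condition
lemma dkLoop_eq_find (L coeff : Nat) (h2 : 2 ≤ coeff) (fuel : Nat) : ∀ c : Nat,
    (∀ j, j < c → ¬ (L * 3 < (8 * coeff ^ j) * 2)) →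
    Nat.find (dk_exists L coeff h2) < c + fuel →
    dkLoop L coeff c fuel = 8 * coeff ^ (Nat.find (dk_exists L coeff h2)) := by
  induction fuel with
  | zero =>
    intro c inv hlt
    exact absurd (Nat.find_spec (dk_exists L coeff h2)) (inv _ (by omega))
  | succ fuel ih =>
    intro c inv hlt
    show (if L * 3 < (8 * coeff ^ c) * 2 then 8 * coeff ^ c
          else dkLoop L coeff (c + 1) fuel) = _
    split
    · next hcond => rw [find_eq_of L coeff h2 c hcond inv]
    · next hcond =>
      refine ih (c + 1) (fun j hj => ?_) (by omega)
      rcases Nat.lt_succ_iff_lt_or_eq.mp hj with h | h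
      · exact inv j h
      · subst h; exact hcond

-- the fuel L*3+1 supplied by the port suffices
lemma find_le (L coeff : Nat) (h2 : 2 ≤ coeff) : Nat.find (dk_exists L coeff h2) ≤ L * 3 := by
  apply Nat.find_le
  have h1 : L * 3 < 2 ^ (L * 3) := Nat.lt_two_pow_self
  have h3 : 2 ^ (L * 3) ≤ coeff ^ (L * 3) := Nat.pow_le_pow_left h2 _
  have : 1 ≤ coeff ^ (L * 3) := Nat.one_le_pow _ _ (by omega)
  omega

theorem main_equiv : ∀ (dict : List (Int × Int)), Spec_get_dksize_py dict (get_dksize_py dict) := by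
  intro dict
  unfold Spec_get_dksize_py get_dksize_py get_dksize_py_alt
  set L := dict.length with hL
  set t := max 8 (L * 3 / 2 + 1) with ht
  set e0 := Nat.size (t - 1) with he0
  have ht8 : 8 ≤ t := le_max_left _ _
  have ht1 : L * 3 / 2 + 1 ≤ t := le_max_right _ _
  have he0lt : t - 1 < 2 ^ e0 := Nat.lt_size_self _
  have he03 : 3 ≤ e0 := by
    have : 2 < e0 := Nat.lt_size.mpr (by omega)
    omega
  by_cases hbig : L > 50000
  · -- coeff = 2; the parity branch of B does not fire
    simp only [hbig, if_true]
    have hif : ¬ (L ≤ 50000 ∧ (e0 - 3) % 2 = 1) := by omega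
    rw [if_neg hif]
    -- t = L*3/2 + 1 since L large
    have htval : t = L * 3 / 2 + 1 := by
      rw [ht]; exact max_eq_right (by omega)
    have hcond : L * 3 < (8 * 2 ^ (e0 - 3)) * 2 := by
      have h8 : (8 : Nat) * 2 ^ (e0 - 3) = 2 ^ e0 := by
        have : (8 : Nat) = 2 ^ 3 := rfl
        rw [this, ← pow_add]; congr 1; omega
      rw [h8]
      omega
    have hmin : ∀ j, j < e0 - 3 → ¬ (L * 3 < (8 * 2 ^ j) * 2) := by
      intro j hj
      have h8 : (8 : Nat) * 2 ^ j = 2 ^ (j + 3) := by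
        have : (8 : Nat) = 2 ^ 3 := rfl
        rw [this, ← pow_add]; congr 1; omega
      have hle : 2 ^ (j + 3) ≤ t - 1 := Nat.lt_size.mp (by omega)
      rw [h8]
      omega
    rw [dkLoop_eq_find L 2 (by omega) (L * 3 + 1) 0 (by omega) (by have := find_le L 2 (by omega); omega),
        find_eq_of L 2 (by omega) (e0 - 3) hcond hmin]
    have h8 : (8 : Nat) * 2 ^ (e0 - 3) = 2 ^ e0 := by
      have : (8 : Nat) = 2 ^ 3 := rfl
      rw [this, ← pow_add]; congr 1; omega
    rw [h8]
  · -- coeff = 4; exponent rounded up to the form 3 + 2c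
    simp only [hbig, if_false]
    set e : Nat := if L ≤ 50000 ∧ (e0 - 3) % 2 = 1 then e0 + 1 else e0 with he
    have hee : e = e0 ∨ e = e0 + 1 := by
      rw [he]; split <;> omega
    have heven : (e - 3) % 2 = 0 := by
      rw [he]; split <;> omega
    have he3 : 3 ≤ e := by omega
    have h2e : (8 : Nat) * 4 ^ ((e - 3) / 2) = 2 ^ e := by
      have h4 : (4 : Nat) = 2 ^ 2 := rfl
      have h8 : (8 : Nat) = 2 ^ 3 := rfl
      rw [h4, h8, ← pow_mul, ← pow_add]; congr 1; omega
    have hcond : L * 3 < (8 * 4 ^ ((e - 3) / 2)) * 2 := by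
      rw [h2e]
      have : 2 ^ e0 ≤ 2 ^ e := Nat.pow_le_pow_right (by omega) (by omega)
      omega
    have hmin : ∀ j, j < (e - 3) / 2 → ¬ (L * 3 < (8 * 4 ^ j) * 2) := by
      intro j hj
      have h8 : (8 : Nat) * 4 ^ j = 2 ^ (3 + 2 * j) := by
        have h4 : (4 : Nat) = 2 ^ 2 := rfl
        have h8' : (8 : Nat) = 2 ^ 3 := rfl
        rw [h4, h8', ← pow_mul, ← pow_add]
      have hexp : 3 + 2 * j < e0 := by omega
      have hle : 2 ^ (3 + 2 * j) ≤ t - 1 := Nat.lt_size.mp (by omega)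
      have hge8 : (8 : Nat) ≤ 2 ^ (3 + 2 * j) := by
        calc (8 : Nat) = 2 ^ 3 := rfl
        _ ≤ 2 ^ (3 + 2 * j) := Nat.pow_le_pow_right (by omega) (by omega)
      rw [h8]
      omega
    rw [dkLoop_eq_find L 4 (by omega) (L * 3 + 1) 0 (by omega) (by have := find_le L 4 (by omega); omega),
        find_eq_of L 4 (by omega) ((e - 3) / 2) hcond hmin, h2e]

-- ===== VERDICT (by name: the statement is the Claim_ definition above) =====
theorem get_dksize_py_spec : Claim_equal_get_dksize_py := fun dict _ => main_equiv dict
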